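-- pv_equiv track=rewrite | github.com/AlexeyRylov/IntroInPy_HomeWork | HW03_EX02.py | mul_pairs
-- ===== SOURCE A (Python) =====
-- def mul_pairs(value):
--     result = []
--     even_number = False
--     if len(value) % 2 == 0:
--         for i in range(int(len(value) / 2)):
--             result.append(value[i] * value[(len(value) - i - 1)])
--     else:
--         for i in range(int(len(value) / 2) + 1):
--             result.append(value[i] * value[(len(value) - i - 1)])
--     return result
-- ===== SOURCE B (Python) =====
-- def mul_pairs(value):
--     mid = len(value) // 2
--     odd = len(value) % 2 == 1
--     stack = []
--     out = []
--     for idx, x in enumerate(value):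
--         if idx < mid:
--             stack.append(x)
--         elif odd and idx == mid:
--             out.append(x * x)
--         else:
--             out.append(x * stack.pop())
--     out.reverse()
--     return out
-- ===== Notes on version B (the rewrite author's own statement) =====
-- stated objective: alternative
-- what changed: Replaces the even/odd-branched index loop over value[i]*value[len-i-1] by a single forward pass with an explicit stack: the first half is pushed, each element of the second half is multiplied with a popped partner (the middle element squares itself), and the inner-to-outer products are reversed at the end.
import Mathlib
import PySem

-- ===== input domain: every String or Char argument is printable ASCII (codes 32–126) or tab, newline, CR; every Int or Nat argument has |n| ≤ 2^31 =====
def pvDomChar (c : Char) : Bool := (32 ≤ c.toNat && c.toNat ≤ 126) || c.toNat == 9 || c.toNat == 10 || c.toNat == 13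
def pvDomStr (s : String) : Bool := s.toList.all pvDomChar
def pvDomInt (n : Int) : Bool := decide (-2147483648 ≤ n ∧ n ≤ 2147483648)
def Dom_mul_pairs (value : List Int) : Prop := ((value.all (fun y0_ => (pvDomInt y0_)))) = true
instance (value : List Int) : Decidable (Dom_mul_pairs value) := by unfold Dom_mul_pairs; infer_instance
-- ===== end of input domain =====

-- B replaces A's even/odd-branched index loop by a single forward pass with an explicit stack:
-- push the first half, multiply each later element with a popped partner, reverse at the end.

-- ===== PORT A =====
-- value[i] and value[len(value)-i-1] are always in range inside these loops, so pyGetD is exact;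
-- int(len(value)/2) is PySem.Int.truncdiv (exact on these magnitudes).
def mul_pairs (value : List Int) : List Int :=
  let n : Int := value.length
  if PySem.Int.mod n 2 == 0 then
    (PySem.List.pyRange 0 (PySem.Int.truncdiv n 2) 1).foldl
      (fun result i =>
        result ++ [PySem.List.pyGetD value i 0 * PySem.List.pyGetD value (n - i - 1) 0]) []
  else
    (PySem.List.pyRange 0 (PySem.Int.truncdiv n 2 + 1) 1).foldl
      (fun result i =>
        result ++ [PySem.List.pyGetD value i 0 * PySem.List.pyGetD value (n - i - 1) 0]) []

-- ===== PORT B =====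
-- the for loop over enumerate(value) as structural recursion over the same state (stack, out);
-- stack.pop() is nonempty at every pop in these runs, so getLastD/dropLast are exact for it.
def pvLoopB (mid : Nat) (odd : Bool) : List Int → Nat → List Int → List Int → List Int × List Int
  | [], _, stack, out => (stack, out)
  | x :: xs, idx, stack, out =>
      if idx < mid then pvLoopB mid odd xs (idx + 1) (stack ++ [x]) out
      else if odd && idx == mid then pvLoopB mid odd xs (idx + 1) stack (out ++ [x * x])
      else pvLoopB mid odd xs (idx + 1) stack.dropLast (out ++ [x * stack.getLastD 0])

def mul_pairs_alt (value : List Int) : List Int :=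
  let mid := value.length / 2
  let odd := value.length % 2 == 1
  ((pvLoopB mid odd value 0 [] []).2).reverse

-- ===== PRECONDITION & SPEC =====
def Spec_mul_pairs (value : List Int) (out : List Int) : Prop := out = mul_pairs_alt value
instance (value : List Int) (out : List Int) : Decidable (Spec_mul_pairs value out) := by unfold Spec_mul_pairs; infer_instance

-- ===== CLAIM (what is proved, stated in full; the proofs are below) =====
def Claim_equal_mul_pairs : Prop := ∀ (value : List Int), Dom_mul_pairs value → Spec_mul_pairs value (mul_pairs value)

-- ===== LEMMAS AND PROOFS =====

-- canonical form: the first ⌈n/2⌉ products value[k] * value[n-1-k]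
def pvCanon (value : List Int) : List Int :=
  (List.range ((value.length + 1) / 2)).map
    (fun k => value.getD k 0 * value.getD (value.length - 1 - k) 0)

lemma a_eq_canon (value : List Int) : mul_pairs value = pvCanon value := by
  unfold mul_pairs pvCanon
  dsimp only
  have hb : ∀ (b : Nat), (∀ k, k < b → k < value.length) →
      (PySem.List.pyRange 0 (b : Int) 1).foldl
      (fun result i =>
        result ++ [PySem.List.pyGetD value i 0 *
          PySem.List.pyGetD value ((value.length : Int) - i - 1) 0]) [] =
      (List.range b).map
        (fun k => value.getD k 0 * value.getD (value.length - 1 - k) 0) := by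
    intro b hbn
    rw [PySem.List.foldl_append_singleton_eq_map, PySem.List.pyRange_zero_nat, List.map_map]
    apply List.map_congr_left
    intro k hk
    simp only [List.mem_range] at hk
    have hkn := hbn k hk
    have h2 : ((value.length : Int) - (k : Int) - 1) = ((value.length - 1 - k : Nat) : Int) := by
      omega
    simp [Function.comp, h2, PySem.List.pyGetD_natCast]
  have hmod : PySem.Int.mod (value.length : Int) 2 = ((value.length % 2 : Nat) : Int) := by
    exact_mod_cast PySem.Int.mod_natCast value.length 2
  have hdiv : PySem.Int.truncdiv (value.length : Int) 2 = ((value.length / 2 : Nat) : Int) := by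
    simp [PySem.Int.truncdiv]
  rw [hmod, hdiv]
  split_ifs with hpar
  · have he : value.length % 2 = 0 := by
      have := of_decide_eq_true hpar
      exact_mod_cast this
    rw [hb (value.length / 2) (by omega)]
    have : value.length / 2 = (value.length + 1) / 2 := by omega
    rw [this]
  · have ho : value.length % 2 = 1 := by
      have : ¬ ((value.length % 2 : Nat) : Int) = 0 := by
        intro h; exact absurd (decide_eq_true h) hpar
      omega
    have hc : ((value.length / 2 : Nat) : Int) + 1 = ((value.length / 2 + 1 : Nat) : Int) := by
      push_cast; ring
    rw [hc, hb (value.length / 2 + 1) (by omega)]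
    have : value.length / 2 + 1 = (value.length + 1) / 2 := by omega
    rw [this]

lemma getLastD_eq_getD (l : List Int) : l.getLastD 0 = l.getD (l.length - 1) 0 := by
  rw [List.getLastD_eq_getLast?, List.getLast?_eq_getElem?]
  simp [List.getD]

lemma phase1 (mid : Nat) (odd : Bool) (A : List Int) :
    ∀ (rest : List Int) (idx : Nat) (st out : List Int), idx + A.length ≤ mid →
      pvLoopB mid odd (A ++ rest) idx st out =
        pvLoopB mid odd rest (idx + A.length) (st ++ A) out := by
  induction A with
  | nil => intro rest idx st out _; simp
  | cons a A ih =>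
    intro rest idx st out hle
    simp only [List.cons_append, pvLoopB]
    rw [if_pos (by simp at hle; omega)]
    rw [ih rest (idx + 1) (st ++ [a]) out (by simp at hle ⊢; omega)]
    simp only [List.length_cons, List.append_assoc, List.singleton_append]
    congr 1
    omega

lemma phase2 (mid : Nat) (odd : Bool) :
    ∀ (B : List Int) (idx : Nat) (st out : List Int),
      mid ≤ idx → (odd = true → mid < idx) → B.length ≤ st.length →
      (pvLoopB mid odd B idx st out).2 =
        out ++ (List.range B.length).map
          (fun i => B.getD i 0 * st.getD (st.length - 1 - i) 0) := by
  intro B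
  induction B with
  | nil => intro idx st out _ _ _; simp [pvLoopB]
  | cons x xs ih =>
    intro idx st out h1 h2 h3
    simp only [List.length_cons] at h3
    simp only [pvLoopB]
    rw [if_neg (by omega)]
    rw [if_neg (by
      intro hc
      simp only [Bool.and_eq_true, beq_iff_eq] at hc
      exact absurd hc.2 (by have := h2 hc.1; omega))]
    rw [ih (idx + 1) st.dropLast (out ++ [x * st.getLastD 0]) (by omega) (fun h => by have := h2 h; omega)
        (by simp [List.length_dropLast]; omega)]
    rw [List.append_assoc, List.singleton_append]
    congr 1
    simp only [List.length_cons]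
    rw [List.range_succ_eq_map, List.map_cons, List.map_map]
    congr 1
    · simp only [List.getD_cons_zero, Nat.sub_zero]
      rw [getLastD_eq_getD st]
    · apply List.map_congr_left
      intro k hk
      simp only [List.mem_range] at hk
      have hd : st.dropLast.length = st.length - 1 := by simp
      have hk1 : st.length - 1 - 1 - k < st.dropLast.length := by omega
      have hk2 : st.length - 1 - (k + 1) < st.length := by omega
      simp only [Function.comp, List.getD_cons_succ, hd]
      rw [List.getD_eq_getElem _ _ hk1, List.getD_eq_getElem _ _ hk2, List.getElem_dropLast]
      congr 2
      omega

lemma b_eq_canon (value : List Int) : mul_pairs_alt value = pvCanon value := by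
  unfold mul_pairs_alt
  dsimp only
  set n := value.length with hn
  set mid := n / 2 with hmid
  have hmn : mid ≤ n := Nat.div_le_self n 2
  have hA : (value.take mid).length = mid := by
    simp [List.length_take]; omega
  have hsplit : value = value.take mid ++ value.drop mid := (List.take_append_drop mid value).symm
  have hgetA : ∀ k, k < mid → (value.take mid).getD k 0 = value.getD k 0 := by
    intro k hk
    rw [List.getD_eq_getElem _ _ (by omega : k < (value.take mid).length),
        List.getD_eq_getElem _ _ (by omega : k < value.length), List.getElem_take]
  rcases Nat.even_or_odd n with he | ho
  · -- even length
    have hpar : n % 2 = 0 := Nat.even_iff.mp he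
    have hodd : (n % 2 == 1) = false := by simp [hpar]
    rw [hodd]
    conv_lhs => rw [hsplit]
    rw [phase1 mid false (value.take mid) (value.drop mid) 0 [] [] (by simp [hA])]
    have hB : (value.drop mid).length = mid := by simp [List.length_drop]; omega
    rw [phase2 mid false (value.drop mid) (0 + (value.take mid).length) ([] ++ value.take mid) []
        (by simp [hA]) (by simp) (by simp [hA, hB])]
    simp only [List.nil_append, hA, hB]
    apply List.ext_getElem
    · simp [pvCanon]
      omega
    · intro k hk1 hk2
      simp only [List.length_reverse, List.length_map, List.length_range] at hk1
      rw [List.getElem_reverse]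
      simp only [List.length_map, List.length_range, List.getElem_map, List.getElem_range]
      unfold pvCanon
      simp only [List.getElem_map, List.getElem_range]
      have e0 : mid - 1 - (mid - 1 - k) = k := by omega
      rw [e0, hgetA k hk1]
      have hdropk : (value.drop mid).getD (mid - 1 - k) 0 = value.getD (n - 1 - k) 0 := by
        rw [List.getD_eq_getElem _ _ (by omega : mid - 1 - k < (value.drop mid).length),
            List.getD_eq_getElem _ _ (by omega : n - 1 - k < value.length), List.getElem_drop]
        exact getElem_congr_idx (by omega)
      rw [hdropk, mul_comm]
  · -- odd length
    have hpar : n % 2 = 1 := Nat.odd_iff.mp ho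
    have hodd : (n % 2 == 1) = true := by simp [hpar]
    rw [hodd]
    have hB : (value.drop mid).length = n - mid := by simp [List.length_drop, ← hn]
    have hmlt : mid < n := by omega
    obtain ⟨x, B2, hxB⟩ : ∃ x B2, value.drop mid = x :: B2 := by
      rcases hd : value.drop mid with _ | ⟨x, B2⟩
      · rw [hd] at hB; simp at hB; omega
      · exact ⟨x, B2, rfl⟩
    have hB2 : B2.length = mid := by
      have h := hB; rw [hxB] at h; simp at h; omega
    conv_lhs => rw [hsplit]
    rw [phase1 mid true (value.take mid) (value.drop mid) 0 [] [] (by simp [hA])]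
    rw [hxB]
    simp only [pvLoopB, hA, Nat.zero_add]
    rw [if_neg (by omega), if_pos (by simp)]
    rw [phase2 mid true B2 (mid + 1) ([] ++ value.take mid) ([] ++ [x * x])
        (by omega) (fun _ => by omega) (by simp [hA]; omega)]
    simp only [List.nil_append, hA, hB2]
    have hx : x = value.getD mid 0 := by
      have h0 : (value.drop mid).getD 0 0 = x := by rw [hxB]; simp
      rw [← h0, List.getD_eq_getElem _ _ (by omega : (0:Nat) < (value.drop mid).length),
          List.getD_eq_getElem _ _ (by omega : mid < value.length), List.getElem_drop]
      exact getElem_congr_idx (by omega)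
    have hgetB2 : ∀ j, j < mid → B2.getD j 0 = value.getD (mid + 1 + j) 0 := by
      intro j hj
      have h0 : (value.drop mid).getD (j + 1) 0 = B2.getD j 0 := by rw [hxB]; simp
      rw [← h0, List.getD_eq_getElem _ _ (by omega : j + 1 < (value.drop mid).length),
          List.getD_eq_getElem _ _ (by omega : mid + 1 + j < value.length), List.getElem_drop]
      exact getElem_congr_idx (by omega)
    rw [List.reverse_append]
    apply List.ext_getElem
    · simp [pvCanon]
      omega
    · intro k hk1 hk2
      simp only [List.length_append, List.length_reverse, List.length_map, List.length_range,
        List.length_cons, List.length_nil] at hk1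
      unfold pvCanon
      simp only [List.getElem_map, List.getElem_range]
      rcases Nat.lt_or_ge k mid with hkm | hkm
      · rw [List.getElem_append_left (by simp; omega)]
        rw [List.getElem_reverse]
        simp only [List.length_map, List.length_range, List.getElem_map, List.getElem_range]
        have e0 : mid - 1 - (mid - 1 - k) = k := by omega
        rw [e0, hgetA k hkm, hgetB2 (mid - 1 - k) (by omega)]
        have e1 : mid + 1 + (mid - 1 - k) = n - 1 - k := by omega
        rw [e1, mul_comm]
      · have hkeq : k = mid := by omega
        subst hkeq
        rw [List.getElem_append_right (by simp)]
        simp only [List.length_reverse, List.length_map, List.length_range]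
        simp only [List.reverse_cons, List.reverse_nil, List.nil_append]
        have e2 : n - 1 - mid = mid := by omega
        rw [e2, ← hx]
        simp

-- ===== VERDICT (by name: the statement is the Claim_ definition above) =====
theorem mul_pairs_spec : Claim_equal_mul_pairs := by
  intro value _
  unfold Spec_mul_pairs
  rw [a_eq_canon, b_eq_canon]
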